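-- pv_equiv track=rewrite | github.com/TeamAuto/ServoDynamixel | Pyads.py | CreationVariableList
-- ===== SOURCE A (Python) =====
-- def CreationVariableList(NomPRG, NomServoList):
--     # NomPRG = le nom ou les fbs des servo sont
--     # Ecrire en Amont (NomServoList = ["ServoAvant", "ServoMillieu", ServoArriere])
--     # Pour separer les differents variables utiliser ca : Nom_ID, Nom_ModeRotation, Nom_PosMin, Nom_PosMax, Nom_PosInit, Nom_Homing, Nom_HomingONOFF, Nom_HomingBasHaut, Nom_CapteurHoming, Nom_VitesseHoming, Nom_ForceHoming, Nom_MoveRun, Nom_PositionOrdre, Nom_Vitesse, Nom_Syncro, Nom_Force, Nom_PositionReel, Nom_Position0, Nom_HomingDone, Nom_Etat, Nom_CodeErreur, Nom_Movement = Nom_ListVariablesALL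
--     LongeurList = len(NomServoList)
--     Nom_ID, Nom_ModeRotation, Nom_PosMin, Nom_PosMax, Nom_PosInit, Nom_Homing, Nom_HomingONOFF, Nom_HomingBasHaut, Nom_CapteurHoming, Nom_VitesseHoming, Nom_ForceHoming, Nom_PositionApresHoming, Nom_ForceMax, Nom_ForceMaxAntihoraire, Nom_ForceDepassee, Nom_MarcheArriere, Nom_MoveRun, Nom_Prioritaire, Nom_PositionOrdre, Nom_Vitesse, Nom_Force, Nom_PositionReel, Nom_Position0, Nom_HomingDone, Nom_Etat, Nom_CodeErreur, Nom_Movement, Nom_EnCycle, Nom_PositionActuelle = [],[],[],[],[],[],[],[],[],[],[],[],[],[],[],[],[],[],[],[],[],[],[],[],[],[],[],[],[]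
--
--     for i in range(LongeurList):
--         Nom_ID = Nom_ID + [NomPRG + "." + NomServoList[i] + "." + "iID"]
--         Nom_ModeRotation = Nom_ModeRotation + [NomPRG + "." + NomServoList [i] + "." +"iModeRotation"]
--         Nom_PosMin = Nom_PosMin + [NomPRG + "." + NomServoList [i] + "." +"iPositionMin"]
--         Nom_PosMax = Nom_PosMax + [NomPRG + "." + NomServoList [i] + "." +"iPositionMax"]
--         Nom_PosInit = Nom_PosInit + [NomPRG + "." + NomServoList [i] + "." + "diPositionInit"]
--         Nom_Homing = Nom_Homing + [NomPRG + "." + NomServoList [i] + "." + "bHoming"]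
--         Nom_HomingONOFF = Nom_HomingONOFF + [NomPRG + "." + NomServoList [i] + "." + "bHomingONOFF"]
--         Nom_HomingBasHaut = Nom_HomingBasHaut + [NomPRG + "." + NomServoList [i] + "." + "iHomingBasHaut"]
--         Nom_CapteurHoming = Nom_CapteurHoming + [NomPRG + "." + NomServoList [i] +  "." +"bCAMHoming"]
--         Nom_VitesseHoming = Nom_VitesseHoming + [NomPRG + "." + NomServoList [i] +  "." +"iVitesseHoming"]
--         Nom_ForceHoming = Nom_ForceHoming + [NomPRG + "." + NomServoList [i] +  "." +"iForceHoming"]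
--         Nom_PositionApresHoming = Nom_PositionApresHoming + [NomPRG + "." + NomServoList [i] + "." + "diPositionApresHoming"]
--         Nom_ForceMax = Nom_ForceMax + [NomPRG + "." + NomServoList [i] + "." + "iForceMax"]
--         Nom_ForceMaxAntihoraire = Nom_ForceMaxAntihoraire + [NomPRG + "." + NomServoList [i] + "." + "iForceMaxAntihoraire"]
--         Nom_ForceDepassee = Nom_ForceDepassee + [NomPRG + "." + NomServoList [i] + "." + "iForceDepassee"]
--         Nom_MarcheArriere= Nom_MarcheArriere + [NomPRG + "." + NomServoList [i] + "." + "diMarcheArriere"]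
--         Nom_MoveRun = Nom_MoveRun + [NomPRG + "." + NomServoList [i] + "." + "bMoveRun"]
--         Nom_Prioritaire = Nom_Prioritaire + [NomPRG + "." + NomServoList [i] + "." + "iPrioritaire"]
--         Nom_PositionOrdre = Nom_PositionOrdre + [NomPRG + "." + NomServoList [i] + "." + "diPositionOrdre"]
--         Nom_Vitesse = Nom_Vitesse + [NomPRG + "." + NomServoList [i] + "." + "iVitesse"]
--         Nom_Force = Nom_Force + [NomPRG + "." + NomServoList [i] + "." + "iForce"]
--         Nom_PositionReel = Nom_PositionReel + [NomPRG + "." + NomServoList [i] + "." + "diPositionReel"]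
--         Nom_Position0 = Nom_Position0 + [NomPRG + "." + NomServoList [i] + "." + "diPosition0"]
--         Nom_HomingDone = Nom_HomingDone + [NomPRG + "." + NomServoList [i] + "." + "bHomingDone"]
--         Nom_Etat = Nom_Etat + [NomPRG + "." + NomServoList [i] + "." + "iEtatActuelle"]
--         Nom_CodeErreur = Nom_CodeErreur + [NomPRG + "." + NomServoList [i] + "." + "iCodeErreur"]
--         Nom_Movement = Nom_Movement + [NomPRG + "." + NomServoList [i] + "." + "bEnMouvement"]
--         Nom_EnCycle =  Nom_EnCycle + [NomPRG + "." + NomServoList [i] + "." + "bEnCycle"]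
--         Nom_PositionActuelle = Nom_PositionActuelle + [NomPRG + "." + NomServoList [i] + "." + "diPositionActuelle"]
--     return Nom_ID, Nom_ModeRotation, Nom_PosMin, Nom_PosMax, Nom_PosInit, Nom_Homing, Nom_HomingONOFF, Nom_HomingBasHaut, Nom_CapteurHoming, Nom_VitesseHoming, Nom_ForceHoming, Nom_PositionApresHoming,Nom_ForceMax,Nom_ForceMaxAntihoraire,Nom_ForceDepassee, Nom_MarcheArriere, Nom_MoveRun, Nom_Prioritaire, Nom_PositionOrdre, Nom_Vitesse, Nom_Force, Nom_PositionReel, Nom_Position0, Nom_HomingDone, Nom_Etat, Nom_CodeErreur, Nom_Movement, Nom_EnCycle, Nom_PositionActuelle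
-- ===== SOURCE B (Python) =====
-- SUFFIXES = ("iID", "iModeRotation", "iPositionMin", "iPositionMax", "diPositionInit",
--             "bHoming", "bHomingONOFF", "iHomingBasHaut", "bCAMHoming", "iVitesseHoming",
--             "iForceHoming", "diPositionApresHoming", "iForceMax", "iForceMaxAntihoraire",
--             "iForceDepassee", "diMarcheArriere", "bMoveRun", "iPrioritaire",
--             "diPositionOrdre", "iVitesse", "iForce", "diPositionReel", "diPosition0",
--             "bHomingDone", "iEtatActuelle", "iCodeErreur", "bEnMouvement", "bEnCycle",
--             "diPositionActuelle")
--
-- def CreationVariableList(NomPRG, NomServoList):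
--     # Build the matrix ROW-major (one 29-name row per servo), then transpose it
--     # into the 29 per-field columns with zip.
--     rows = [[NomPRG + "." + s + "." + sfx for sfx in SUFFIXES] for s in NomServoList]
--     if not rows:
--         return tuple([] for _ in SUFFIXES)
--     return tuple(list(col) for col in zip(*rows))
-- ===== Notes on version B (the rewrite author's own statement) =====
-- stated objective: alternative
-- what changed: B builds the name matrix row-major (one 29-name row per servo) and then transposes it with zip(*rows) into the 29 per-field lists, instead of A's single servo loop that appends into 29 named column accumulators.
import Mathlib
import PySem

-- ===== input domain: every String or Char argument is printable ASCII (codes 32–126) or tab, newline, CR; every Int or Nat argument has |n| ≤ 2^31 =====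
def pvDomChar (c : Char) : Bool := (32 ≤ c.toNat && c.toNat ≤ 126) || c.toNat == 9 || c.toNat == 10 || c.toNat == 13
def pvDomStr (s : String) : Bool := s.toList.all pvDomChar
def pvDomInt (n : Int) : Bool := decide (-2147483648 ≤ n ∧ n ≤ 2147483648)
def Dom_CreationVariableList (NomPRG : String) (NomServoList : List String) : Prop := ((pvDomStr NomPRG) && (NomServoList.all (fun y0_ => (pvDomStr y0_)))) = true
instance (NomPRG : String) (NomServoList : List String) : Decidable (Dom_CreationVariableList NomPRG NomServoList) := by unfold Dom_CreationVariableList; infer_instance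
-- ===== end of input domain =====

-- B builds the name matrix row-major (one 29-name row per servo) and transposes it
-- with zip, instead of A's servo loop appending into 29 named column accumulators
-- (alternative decomposition; same cost). Python A returns a 29-tuple of lists;
-- both ports render it as a 29-element list.

-- ===== PORT A =====
-- A's 29 named accumulator lists, one field per variable family.
structure StA where
  nomID : List String
  nomModeRotation : List String
  nomPosMin : List String
  nomPosMax : List String
  nomPosInit : List String
  nomHoming : List String
  nomHomingONOFF : List String
  nomHomingBasHaut : List String
  nomCapteurHoming : List String
  nomVitesseHoming : List String
  nomForceHoming : List String
  nomPositionApresHoming : List String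
  nomForceMax : List String
  nomForceMaxAntihoraire : List String
  nomForceDepassee : List String
  nomMarcheArriere : List String
  nomMoveRun : List String
  nomPrioritaire : List String
  nomPositionOrdre : List String
  nomVitesse : List String
  nomForce : List String
  nomPositionReel : List String
  nomPosition0 : List String
  nomHomingDone : List String
  nomEtat : List String
  nomCodeErreur : List String
  nomMovement : List String
  nomEnCycle : List String
  nomPositionActuelle : List String
  deriving Repr, DecidableEq

-- One iteration of A's for-loop: append one name to each of the 29 accumulators.
def stepA (NomPRG : String) (NomServoList : List String) (S : StA) (i : Int) : StA :=
  {
    nomID := S.nomID ++ [NomPRG ++ "." ++ PySem.List.pyGetD NomServoList i "" ++ "." ++ "iID"],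
    nomModeRotation := S.nomModeRotation ++ [NomPRG ++ "." ++ PySem.List.pyGetD NomServoList i "" ++ "." ++ "iModeRotation"],
    nomPosMin := S.nomPosMin ++ [NomPRG ++ "." ++ PySem.List.pyGetD NomServoList i "" ++ "." ++ "iPositionMin"],
    nomPosMax := S.nomPosMax ++ [NomPRG ++ "." ++ PySem.List.pyGetD NomServoList i "" ++ "." ++ "iPositionMax"],
    nomPosInit := S.nomPosInit ++ [NomPRG ++ "." ++ PySem.List.pyGetD NomServoList i "" ++ "." ++ "diPositionInit"],
    nomHoming := S.nomHoming ++ [NomPRG ++ "." ++ PySem.List.pyGetD NomServoList i "" ++ "." ++ "bHoming"],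
    nomHomingONOFF := S.nomHomingONOFF ++ [NomPRG ++ "." ++ PySem.List.pyGetD NomServoList i "" ++ "." ++ "bHomingONOFF"],
    nomHomingBasHaut := S.nomHomingBasHaut ++ [NomPRG ++ "." ++ PySem.List.pyGetD NomServoList i "" ++ "." ++ "iHomingBasHaut"],
    nomCapteurHoming := S.nomCapteurHoming ++ [NomPRG ++ "." ++ PySem.List.pyGetD NomServoList i "" ++ "." ++ "bCAMHoming"],
    nomVitesseHoming := S.nomVitesseHoming ++ [NomPRG ++ "." ++ PySem.List.pyGetD NomServoList i "" ++ "." ++ "iVitesseHoming"],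
    nomForceHoming := S.nomForceHoming ++ [NomPRG ++ "." ++ PySem.List.pyGetD NomServoList i "" ++ "." ++ "iForceHoming"],
    nomPositionApresHoming := S.nomPositionApresHoming ++ [NomPRG ++ "." ++ PySem.List.pyGetD NomServoList i "" ++ "." ++ "diPositionApresHoming"],
    nomForceMax := S.nomForceMax ++ [NomPRG ++ "." ++ PySem.List.pyGetD NomServoList i "" ++ "." ++ "iForceMax"],
    nomForceMaxAntihoraire := S.nomForceMaxAntihoraire ++ [NomPRG ++ "." ++ PySem.List.pyGetD NomServoList i "" ++ "." ++ "iForceMaxAntihoraire"],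
    nomForceDepassee := S.nomForceDepassee ++ [NomPRG ++ "." ++ PySem.List.pyGetD NomServoList i "" ++ "." ++ "iForceDepassee"],
    nomMarcheArriere := S.nomMarcheArriere ++ [NomPRG ++ "." ++ PySem.List.pyGetD NomServoList i "" ++ "." ++ "diMarcheArriere"],
    nomMoveRun := S.nomMoveRun ++ [NomPRG ++ "." ++ PySem.List.pyGetD NomServoList i "" ++ "." ++ "bMoveRun"],
    nomPrioritaire := S.nomPrioritaire ++ [NomPRG ++ "." ++ PySem.List.pyGetD NomServoList i "" ++ "." ++ "iPrioritaire"],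
    nomPositionOrdre := S.nomPositionOrdre ++ [NomPRG ++ "." ++ PySem.List.pyGetD NomServoList i "" ++ "." ++ "diPositionOrdre"],
    nomVitesse := S.nomVitesse ++ [NomPRG ++ "." ++ PySem.List.pyGetD NomServoList i "" ++ "." ++ "iVitesse"],
    nomForce := S.nomForce ++ [NomPRG ++ "." ++ PySem.List.pyGetD NomServoList i "" ++ "." ++ "iForce"],
    nomPositionReel := S.nomPositionReel ++ [NomPRG ++ "." ++ PySem.List.pyGetD NomServoList i "" ++ "." ++ "diPositionReel"],
    nomPosition0 := S.nomPosition0 ++ [NomPRG ++ "." ++ PySem.List.pyGetD NomServoList i "" ++ "." ++ "diPosition0"],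
    nomHomingDone := S.nomHomingDone ++ [NomPRG ++ "." ++ PySem.List.pyGetD NomServoList i "" ++ "." ++ "bHomingDone"],
    nomEtat := S.nomEtat ++ [NomPRG ++ "." ++ PySem.List.pyGetD NomServoList i "" ++ "." ++ "iEtatActuelle"],
    nomCodeErreur := S.nomCodeErreur ++ [NomPRG ++ "." ++ PySem.List.pyGetD NomServoList i "" ++ "." ++ "iCodeErreur"],
    nomMovement := S.nomMovement ++ [NomPRG ++ "." ++ PySem.List.pyGetD NomServoList i "" ++ "." ++ "bEnMouvement"],
    nomEnCycle := S.nomEnCycle ++ [NomPRG ++ "." ++ PySem.List.pyGetD NomServoList i "" ++ "." ++ "bEnCycle"],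
    nomPositionActuelle := S.nomPositionActuelle ++ [NomPRG ++ "." ++ PySem.List.pyGetD NomServoList i "" ++ "." ++ "diPositionActuelle"] }

def CreationVariableList (NomPRG : String) (NomServoList : List String) : List (List String) :=
  let LongeurList := PySem.List.len NomServoList
  let r := (PySem.List.pyRange 0 LongeurList 1).foldl (stepA NomPRG NomServoList) ⟨[], [], [], [], [], [], [], [], [], [], [], [], [], [], [], [], [], [], [], [], [], [], [], [], [], [], [], [], []⟩
  [r.nomID, r.nomModeRotation, r.nomPosMin, r.nomPosMax, r.nomPosInit, r.nomHoming, r.nomHomingONOFF, r.nomHomingBasHaut, r.nomCapteurHoming, r.nomVitesseHoming, r.nomForceHoming, r.nomPositionApresHoming, r.nomForceMax, r.nomForceMaxAntihoraire, r.nomForceDepassee, r.nomMarcheArriere, r.nomMoveRun, r.nomPrioritaire, r.nomPositionOrdre, r.nomVitesse, r.nomForce, r.nomPositionReel, r.nomPosition0, r.nomHomingDone, r.nomEtat, r.nomCodeErreur, r.nomMovement, r.nomEnCycle, r.nomPositionActuelle]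

-- ===== PORT B =====
def pvSuffixes : List String :=
  ["iID", "iModeRotation", "iPositionMin", "iPositionMax", "diPositionInit", "bHoming", "bHomingONOFF", "iHomingBasHaut", "bCAMHoming", "iVitesseHoming", "iForceHoming", "diPositionApresHoming", "iForceMax", "iForceMaxAntihoraire", "iForceDepassee", "diMarcheArriere", "bMoveRun", "iPrioritaire", "diPositionOrdre", "iVitesse", "iForce", "diPositionReel", "diPosition0", "bHomingDone", "iEtatActuelle", "iCodeErreur", "bEnMouvement", "bEnCycle", "diPositionActuelle"]

-- Port of Python's zip(*rows): emit the list of current heads and recurse on the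
-- tails, stopping as soon as any row is exhausted (exact zip semantics; no rows =>
-- no columns). Structural recursion on the first row.
def pvZipGo : List String → List (List String) → List (List String)
  | [], _ => []
  | a :: r0, rest =>
      if rest.any List.isEmpty then []
      else (a :: rest.map (fun r => r.headD "")) :: pvZipGo r0 (rest.map List.tail)

def pvZipCols (rows : List (List String)) : List (List String) :=
  match rows with
  | [] => []
  | r0 :: rest => pvZipGo r0 rest

def CreationVariableList_alt (NomPRG : String) (NomServoList : List String) : List (List String) :=
  let rows := NomServoList.map (fun s => pvSuffixes.map (fun sfx => NomPRG ++ "." ++ s ++ "." ++ sfx))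
  if rows.isEmpty then pvSuffixes.map (fun _ => []) else pvZipCols rows

-- ===== PRECONDITION & SPEC =====
def Spec_CreationVariableList (NomPRG : String) (NomServoList : List String) (out : List (List String)) : Prop := out = CreationVariableList_alt NomPRG NomServoList
instance (NomPRG : String) (NomServoList : List String) (out : List (List String)) : Decidable (Spec_CreationVariableList NomPRG NomServoList out) := by unfold Spec_CreationVariableList; infer_instance

-- ===== CLAIM (what is proved, stated in full; the proofs are below) =====
def Claim_equal_CreationVariableList : Prop := ∀ (NomPRG : String) (NomServoList : List String), Dom_CreationVariableList NomPRG NomServoList → Spec_CreationVariableList NomPRG NomServoList (CreationVariableList NomPRG NomServoList)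

-- ===== LEMMAS AND PROOFS =====
-- A's loop step, seen per servo element.
def stepF (NomPRG : String) (S : StA) (s : String) : StA :=
  {
    nomID := S.nomID ++ [NomPRG ++ "." ++ s ++ "." ++ "iID"],
    nomModeRotation := S.nomModeRotation ++ [NomPRG ++ "." ++ s ++ "." ++ "iModeRotation"],
    nomPosMin := S.nomPosMin ++ [NomPRG ++ "." ++ s ++ "." ++ "iPositionMin"],
    nomPosMax := S.nomPosMax ++ [NomPRG ++ "." ++ s ++ "." ++ "iPositionMax"],
    nomPosInit := S.nomPosInit ++ [NomPRG ++ "." ++ s ++ "." ++ "diPositionInit"],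
    nomHoming := S.nomHoming ++ [NomPRG ++ "." ++ s ++ "." ++ "bHoming"],
    nomHomingONOFF := S.nomHomingONOFF ++ [NomPRG ++ "." ++ s ++ "." ++ "bHomingONOFF"],
    nomHomingBasHaut := S.nomHomingBasHaut ++ [NomPRG ++ "." ++ s ++ "." ++ "iHomingBasHaut"],
    nomCapteurHoming := S.nomCapteurHoming ++ [NomPRG ++ "." ++ s ++ "." ++ "bCAMHoming"],
    nomVitesseHoming := S.nomVitesseHoming ++ [NomPRG ++ "." ++ s ++ "." ++ "iVitesseHoming"],
    nomForceHoming := S.nomForceHoming ++ [NomPRG ++ "." ++ s ++ "." ++ "iForceHoming"],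
    nomPositionApresHoming := S.nomPositionApresHoming ++ [NomPRG ++ "." ++ s ++ "." ++ "diPositionApresHoming"],
    nomForceMax := S.nomForceMax ++ [NomPRG ++ "." ++ s ++ "." ++ "iForceMax"],
    nomForceMaxAntihoraire := S.nomForceMaxAntihoraire ++ [NomPRG ++ "." ++ s ++ "." ++ "iForceMaxAntihoraire"],
    nomForceDepassee := S.nomForceDepassee ++ [NomPRG ++ "." ++ s ++ "." ++ "iForceDepassee"],
    nomMarcheArriere := S.nomMarcheArriere ++ [NomPRG ++ "." ++ s ++ "." ++ "diMarcheArriere"],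
    nomMoveRun := S.nomMoveRun ++ [NomPRG ++ "." ++ s ++ "." ++ "bMoveRun"],
    nomPrioritaire := S.nomPrioritaire ++ [NomPRG ++ "." ++ s ++ "." ++ "iPrioritaire"],
    nomPositionOrdre := S.nomPositionOrdre ++ [NomPRG ++ "." ++ s ++ "." ++ "diPositionOrdre"],
    nomVitesse := S.nomVitesse ++ [NomPRG ++ "." ++ s ++ "." ++ "iVitesse"],
    nomForce := S.nomForce ++ [NomPRG ++ "." ++ s ++ "." ++ "iForce"],
    nomPositionReel := S.nomPositionReel ++ [NomPRG ++ "." ++ s ++ "." ++ "diPositionReel"],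
    nomPosition0 := S.nomPosition0 ++ [NomPRG ++ "." ++ s ++ "." ++ "diPosition0"],
    nomHomingDone := S.nomHomingDone ++ [NomPRG ++ "." ++ s ++ "." ++ "bHomingDone"],
    nomEtat := S.nomEtat ++ [NomPRG ++ "." ++ s ++ "." ++ "iEtatActuelle"],
    nomCodeErreur := S.nomCodeErreur ++ [NomPRG ++ "." ++ s ++ "." ++ "iCodeErreur"],
    nomMovement := S.nomMovement ++ [NomPRG ++ "." ++ s ++ "." ++ "bEnMouvement"],
    nomEnCycle := S.nomEnCycle ++ [NomPRG ++ "." ++ s ++ "." ++ "bEnCycle"],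
    nomPositionActuelle := S.nomPositionActuelle ++ [NomPRG ++ "." ++ s ++ "." ++ "diPositionActuelle"] }

-- A's loop step reads NomServoList[i] and appends one name to each accumulator:
-- it is the servo-wise step applied to that element.
theorem stepA_eq (NomPRG : String) (NomServoList : List String) :
    stepA NomPRG NomServoList =
      fun S i => stepF NomPRG S (PySem.List.pyGetD NomServoList i "") := rfl

theorem foldl_stepF (NomPRG : String) (NomServoList : List String) (S : StA) :
    NomServoList.foldl (stepF NomPRG) S =
      ⟨S.nomID ++ NomServoList.map (fun s => NomPRG ++ "." ++ s ++ "." ++ "iID"),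
    S.nomModeRotation ++ NomServoList.map (fun s => NomPRG ++ "." ++ s ++ "." ++ "iModeRotation"),
    S.nomPosMin ++ NomServoList.map (fun s => NomPRG ++ "." ++ s ++ "." ++ "iPositionMin"),
    S.nomPosMax ++ NomServoList.map (fun s => NomPRG ++ "." ++ s ++ "." ++ "iPositionMax"),
    S.nomPosInit ++ NomServoList.map (fun s => NomPRG ++ "." ++ s ++ "." ++ "diPositionInit"),
    S.nomHoming ++ NomServoList.map (fun s => NomPRG ++ "." ++ s ++ "." ++ "bHoming"),
    S.nomHomingONOFF ++ NomServoList.map (fun s => NomPRG ++ "." ++ s ++ "." ++ "bHomingONOFF"),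
    S.nomHomingBasHaut ++ NomServoList.map (fun s => NomPRG ++ "." ++ s ++ "." ++ "iHomingBasHaut"),
    S.nomCapteurHoming ++ NomServoList.map (fun s => NomPRG ++ "." ++ s ++ "." ++ "bCAMHoming"),
    S.nomVitesseHoming ++ NomServoList.map (fun s => NomPRG ++ "." ++ s ++ "." ++ "iVitesseHoming"),
    S.nomForceHoming ++ NomServoList.map (fun s => NomPRG ++ "." ++ s ++ "." ++ "iForceHoming"),
    S.nomPositionApresHoming ++ NomServoList.map (fun s => NomPRG ++ "." ++ s ++ "." ++ "diPositionApresHoming"),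
    S.nomForceMax ++ NomServoList.map (fun s => NomPRG ++ "." ++ s ++ "." ++ "iForceMax"),
    S.nomForceMaxAntihoraire ++ NomServoList.map (fun s => NomPRG ++ "." ++ s ++ "." ++ "iForceMaxAntihoraire"),
    S.nomForceDepassee ++ NomServoList.map (fun s => NomPRG ++ "." ++ s ++ "." ++ "iForceDepassee"),
    S.nomMarcheArriere ++ NomServoList.map (fun s => NomPRG ++ "." ++ s ++ "." ++ "diMarcheArriere"),
    S.nomMoveRun ++ NomServoList.map (fun s => NomPRG ++ "." ++ s ++ "." ++ "bMoveRun"),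
    S.nomPrioritaire ++ NomServoList.map (fun s => NomPRG ++ "." ++ s ++ "." ++ "iPrioritaire"),
    S.nomPositionOrdre ++ NomServoList.map (fun s => NomPRG ++ "." ++ s ++ "." ++ "diPositionOrdre"),
    S.nomVitesse ++ NomServoList.map (fun s => NomPRG ++ "." ++ s ++ "." ++ "iVitesse"),
    S.nomForce ++ NomServoList.map (fun s => NomPRG ++ "." ++ s ++ "." ++ "iForce"),
    S.nomPositionReel ++ NomServoList.map (fun s => NomPRG ++ "." ++ s ++ "." ++ "diPositionReel"),
    S.nomPosition0 ++ NomServoList.map (fun s => NomPRG ++ "." ++ s ++ "." ++ "diPosition0"),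
    S.nomHomingDone ++ NomServoList.map (fun s => NomPRG ++ "." ++ s ++ "." ++ "bHomingDone"),
    S.nomEtat ++ NomServoList.map (fun s => NomPRG ++ "." ++ s ++ "." ++ "iEtatActuelle"),
    S.nomCodeErreur ++ NomServoList.map (fun s => NomPRG ++ "." ++ s ++ "." ++ "iCodeErreur"),
    S.nomMovement ++ NomServoList.map (fun s => NomPRG ++ "." ++ s ++ "." ++ "bEnMouvement"),
    S.nomEnCycle ++ NomServoList.map (fun s => NomPRG ++ "." ++ s ++ "." ++ "bEnCycle"),
    S.nomPositionActuelle ++ NomServoList.map (fun s => NomPRG ++ "." ++ s ++ "." ++ "diPositionActuelle")⟩ := by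
  induction NomServoList generalizing S with
  | nil => simp
  | cons a xs ih =>
    simp only [List.foldl_cons, ih, List.map_cons, stepF, List.append_assoc,
      List.singleton_append]

-- Transposing the row-major matrix yields, per suffix, the map over the servo list.
theorem pvZipGo_map (g : String → String → String) (x : String) (xs : List String)
    (sfxs : List String) :
    pvZipGo (sfxs.map (g x)) (xs.map (fun s => sfxs.map (g s))) =
      sfxs.map (fun c => (x :: xs).map (fun s => g s c)) := by
  induction sfxs generalizing x with
  | nil => simp [pvZipGo]
  | cons c cs ih =>
    simp only [List.map_cons, pvZipGo]
    rw [if_neg (by simp)]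
    simp [List.map_map, Function.comp_def, ih]

theorem alt_eq_cols (NomPRG a : String) (as : List String) :
    CreationVariableList_alt NomPRG (a :: as) =
      pvSuffixes.map (fun c => (a :: as).map (fun s => NomPRG ++ "." ++ s ++ "." ++ c)) := by
  have h := pvZipGo_map (fun s c => NomPRG ++ "." ++ s ++ "." ++ c) a as pvSuffixes
  unfold CreationVariableList_alt
  simp only [List.map_cons, List.isEmpty_cons, Bool.false_eq_true, if_false, pvZipCols]
  exact h

-- ===== VERDICT (by name: the statement is the Claim_ definition above) =====
theorem CreationVariableList_spec : Claim_equal_CreationVariableList := by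
  intro NomPRG NomServoList _
  unfold Spec_CreationVariableList
  cases NomServoList with
  | nil =>
    unfold CreationVariableList CreationVariableList_alt
    simp [pvSuffixes, PySem.List.len, PySem.List.pyRange]
  | cons a as =>
    rw [alt_eq_cols]
    unfold CreationVariableList
    simp only [PySem.List.len, stepA_eq,
      PySem.List.foldl_pyRange_zero_pyGetD' (a :: as) "" (stepF NomPRG) ⟨[], [], [], [], [], [], [], [], [], [], [], [], [], [], [], [], [], [], [], [], [], [], [], [], [], [], [], [], []⟩,
      foldl_stepF, List.nil_append]
    simp [pvSuffixes]
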